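-- pv_equiv track=rewrite | github.com/inezaodon/PRINCOMP_FINAL_PREOJECT | scripts/export_plot_specs.py | extract_newplot_args
-- ===== SOURCE A (Python) =====
-- def split_top_level_args(s: str) -> list[str]:
--     args: list[str] = []
--     cur: list[str] = []
--     depth = 0
--     in_str = False
--     esc = False
--     quote = '"'
--     for ch in s:
--         if in_str:
--             cur.append(ch)
--             if esc:
--                 esc = False
--             elif ch == "\\":
--                 esc = True
--             elif ch == quote:
--                 in_str = False
--             continue
--         if ch in ('"', "'"):
--             in_str = True
--             quote = ch
--             cur.append(ch)
--             continue
--         if ch in "[{(":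
--             depth += 1
--             cur.append(ch)
--             continue
--         if ch in "]})":
--             depth -= 1
--             cur.append(ch)
--             continue
--         if ch == "," and depth == 0:
--             args.append("".join(cur).strip())
--             cur = []
--             continue
--         cur.append(ch)
--     tail = "".join(cur).strip()
--     if tail:
--         args.append(tail)
--     return args
--
-- def extract_newplot_args(html: str) -> tuple[str, str] | None:
--     key = "Plotly.newPlot("
--     i = html.find(key)
--     if i < 0:
--         return None
--     j = i + len(key)
--     depth = 1
--     in_str = False
--     esc = False
--     quote = '"'
--     buf: list[str] = []
--     while j < len(html):
--         ch = html[j]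
--         if in_str:
--             buf.append(ch)
--             if esc:
--                 esc = False
--             elif ch == "\\":
--                 esc = True
--             elif ch == quote:
--                 in_str = False
--             j += 1
--             continue
--         if ch in ('"', "'"):
--             in_str = True
--             quote = ch
--             buf.append(ch)
--             j += 1
--             continue
--         if ch == "(":
--             depth += 1
--             buf.append(ch)
--             j += 1
--             continue
--         if ch == ")":
--             depth -= 1
--             if depth == 0:
--                 break
--             buf.append(ch)
--             j += 1
--             continue
--         buf.append(ch)
--         j += 1
--     arg_str = "".join(buf)
--     args = split_top_level_args(arg_str)
--     if len(args) < 3: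
--         return None
--     return args[1], args[2]
-- ===== SOURCE B (Python) =====
-- def extract_newplot_args(html: str) -> tuple[str, str] | None:
--     # Single fused pass: find the call, then split into top-level args while
--     # tracking paren depth (call end) and bracket depth (top-level commas) at once.
--     key = "Plotly.newPlot("
--     i = html.find(key)
--     if i < 0:
--         return None
--     args: list[str] = []
--     cur: list[str] = []
--     paren = 1      # only ( ) — decides where the call ends
--     bracket = 0    # all of ([{ )]} — decides top-level commas
--     in_str = False
--     esc = False
--     quote = '"'
--     for ch in html[i + len(key):]:
--         if in_str:
--             cur.append(ch)
--             if esc: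
--                 esc = False
--             elif ch == "\\":
--                 esc = True
--             elif ch == quote:
--                 in_str = False
--             continue
--         if ch in ('"', "'"):
--             in_str = True
--             quote = ch
--             cur.append(ch)
--             continue
--         if ch == ")":
--             paren -= 1
--             if paren == 0:
--                 break
--             bracket -= 1
--             cur.append(ch)
--             continue
--         if ch == "(":
--             paren += 1
--             bracket += 1
--             cur.append(ch)
--             continue
--         if ch in "[{":
--             bracket += 1
--             cur.append(ch)
--             continue
--         if ch in "]}":
--             bracket -= 1
--             cur.append(ch)
--             continue
--         if ch == "," and bracket == 0:
--             args.append("".join(cur).strip())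
--             cur = []
--             continue
--         cur.append(ch)
--     tail = "".join(cur).strip()
--     if tail:
--         args.append(tail)
--     if len(args) < 3:
--         return None
--     return args[1], args[2]
-- ===== Notes on version B (the rewrite author's own statement) =====
-- stated objective: simpler
-- what changed: Replaces A's two sequential passes (extract the call's argument text with a paren-depth scanner, then re-parse it with a separate split_top_level_args helper) by one fused single-pass parser that tracks paren depth and bracket depth simultaneously and emits stripped top-level arguments directly, eliminating the intermediate arg_str and the helper.
import Mathlib
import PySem

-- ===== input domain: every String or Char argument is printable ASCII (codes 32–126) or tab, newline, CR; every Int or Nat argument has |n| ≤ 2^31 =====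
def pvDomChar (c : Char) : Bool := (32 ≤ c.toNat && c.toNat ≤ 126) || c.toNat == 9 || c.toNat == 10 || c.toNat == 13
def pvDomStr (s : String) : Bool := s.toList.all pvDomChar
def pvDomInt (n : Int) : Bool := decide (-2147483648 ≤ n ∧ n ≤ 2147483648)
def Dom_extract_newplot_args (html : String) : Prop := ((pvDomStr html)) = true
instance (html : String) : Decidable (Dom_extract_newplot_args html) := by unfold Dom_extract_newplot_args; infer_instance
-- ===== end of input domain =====

-- B fuses A's two passes (extract the call's text, then split it) into one pass that
-- tracks paren depth and bracket depth simultaneously; objective: simpler, same cost.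

-- ===== PORT A =====
-- A's while-loop collecting the argument text of the call: recursion over the suffix,
-- state = (paren depth, in_str, esc, quote); stops at end of input or when depth hits 0.
def pvScanA : List Char → Int → Bool → Bool → Char → List Char
  | [], _, _, _, _ => []
  | ch :: cs, depth, instr, esc, quote =>
    if instr then
      ch :: (if esc then pvScanA cs depth true false quote
             else if ch = '\\' then pvScanA cs depth true true quote
             else if ch = quote then pvScanA cs depth false false quote
             else pvScanA cs depth true false quote)
    else if ch = '"' ∨ ch = '\'' then ch :: pvScanA cs depth true esc ch
    else if ch = '(' then ch :: pvScanA cs (depth + 1) instr esc quote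
    else if ch = ')' then
      (if depth - 1 = 0 then [] else ch :: pvScanA cs (depth - 1) instr esc quote)
    else ch :: pvScanA cs depth instr esc quote

-- split_top_level_args: fold over the extracted text, state = (args, cur, depth, in_str, esc, quote).
def pvSplitA : List Char → List String → List Char → Int → Bool → Bool → Char → List String
  | [], args, cur, _, _, _, _ =>
      let tail := PySem.Str.strip (String.ofList cur)
      if tail ≠ "" then args ++ [tail] else args
  | ch :: s, args, cur, depth, instr, esc, quote =>
    if instr then
      (if esc then pvSplitA s args (cur ++ [ch]) depth true false quote
       else if ch = '\\' then pvSplitA s args (cur ++ [ch]) depth true true quote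
       else if ch = quote then pvSplitA s args (cur ++ [ch]) depth false false quote
       else pvSplitA s args (cur ++ [ch]) depth true false quote)
    else if ch = '"' ∨ ch = '\'' then pvSplitA s args (cur ++ [ch]) depth true esc ch
    else if ch = '[' ∨ ch = '{' ∨ ch = '(' then pvSplitA s args (cur ++ [ch]) (depth + 1) instr esc quote
    else if ch = ']' ∨ ch = '}' ∨ ch = ')' then pvSplitA s args (cur ++ [ch]) (depth - 1) instr esc quote
    else if ch = ',' ∧ depth = 0 then pvSplitA s (args ++ [PySem.Str.strip (String.ofList cur)]) [] depth instr esc quote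
    else pvSplitA s args (cur ++ [ch]) depth instr esc quote

def extract_newplot_args (html : String) : Option (String × String) :=
  let key := "Plotly.newPlot("
  let i := PySem.Str.find html key
  if i < 0 then none
  else
    let cs := html.toList.drop (i.toNat + key.toList.length)   -- the suffix html[j:], j = i + len(key)
    let buf := pvScanA cs 1 false false '"'
    let args := pvSplitA buf [] [] 0 false false '"'
    if args.length < 3 then none
    else some (args.getD 1 "", args.getD 2 "")

-- ===== PORT B =====
-- B's single fused loop: state = (args, cur, paren, bracket, in_str, esc, quote).
def pvFusedB : List Char → List String → List Char → Int → Int → Bool → Bool → Char → List String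
  | [], args, cur, _, _, _, _, _ =>
      let tail := PySem.Str.strip (String.ofList cur)
      if tail ≠ "" then args ++ [tail] else args
  | ch :: s, args, cur, paren, bracket, instr, esc, quote =>
    if instr then
      (if esc then pvFusedB s args (cur ++ [ch]) paren bracket true false quote
       else if ch = '\\' then pvFusedB s args (cur ++ [ch]) paren bracket true true quote
       else if ch = quote then pvFusedB s args (cur ++ [ch]) paren bracket false false quote
       else pvFusedB s args (cur ++ [ch]) paren bracket true false quote)
    else if ch = '"' ∨ ch = '\'' then pvFusedB s args (cur ++ [ch]) paren bracket true esc ch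
    else if ch = ')' then
      (if paren - 1 = 0 then
        let tail := PySem.Str.strip (String.ofList cur)
        if tail ≠ "" then args ++ [tail] else args
       else pvFusedB s args (cur ++ [ch]) (paren - 1) (bracket - 1) instr esc quote)
    else if ch = '(' then pvFusedB s args (cur ++ [ch]) (paren + 1) (bracket + 1) instr esc quote
    else if ch = '[' ∨ ch = '{' then pvFusedB s args (cur ++ [ch]) paren (bracket + 1) instr esc quote
    else if ch = ']' ∨ ch = '}' then pvFusedB s args (cur ++ [ch]) paren (bracket - 1) instr esc quote
    else if ch = ',' ∧ bracket = 0 then pvFusedB s (args ++ [PySem.Str.strip (String.ofList cur)]) [] paren bracket instr esc quote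
    else pvFusedB s args (cur ++ [ch]) paren bracket instr esc quote

def extract_newplot_args_alt (html : String) : Option (String × String) :=
  let key := "Plotly.newPlot("
  let i := PySem.Str.find html key
  if i < 0 then none
  else
    let cs := html.toList.drop (i.toNat + key.toList.length)
    let args := pvFusedB cs [] [] 1 0 false false '"'
    if args.length < 3 then none
    else some (args.getD 1 "", args.getD 2 "")

-- ===== PRECONDITION & SPEC =====
def Spec_extract_newplot_args (html : String) (out : Option (String × String)) : Prop := out = extract_newplot_args_alt html
instance (html : String) (out : Option (String × String)) : Decidable (Spec_extract_newplot_args html out) := by unfold Spec_extract_newplot_args; infer_instance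

-- ===== CLAIM (what is proved, stated in full; the proofs are below) =====
def Claim_equal_extract_newplot_args : Prop := ∀ (html : String), Dom_extract_newplot_args html → Spec_extract_newplot_args html (extract_newplot_args html)

-- ===== LEMMAS AND PROOFS =====

-- Fusion: running A's splitter over A's scan output, with the splitter's string state
-- equal to the scanner's (they read the same characters), is B's single loop.
theorem pvFuse (cs : List Char) :
    ∀ (args : List String) (cur : List Char) (paren bracket : Int) (instr esc : Bool) (quote : Char),
    pvSplitA (pvScanA cs paren instr esc quote) args cur bracket instr esc quote
      = pvFusedB cs args cur paren bracket instr esc quote := by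
  induction cs with
  | nil => intro args cur paren bracket instr esc quote; rfl
  | cons ch cs ih =>
    intro args cur paren bracket instr esc quote
    simp only [pvScanA]
    split_ifs with h1 h2 h3 h4 h5 h6 h7 h8 <;>
      (simp only [pvSplitA, pvFusedB]; split_ifs <;> first | apply ih | rfl | simp_all)

-- ===== VERDICT (by name: the statement is the Claim_ definition above) =====
theorem extract_newplot_args_spec : Claim_equal_extract_newplot_args := by
  intro html _
  unfold Spec_extract_newplot_args extract_newplot_args extract_newplot_args_alt
  simp only [pvFuse]
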